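-- pv_equiv track=rewrite | github.com/quirrelHK/DSA | a2z/basic_questions/7_maximum_aqua_curtain_in_labelled.py | solve
-- ===== SOURCE A (Python) =====
-- def solve(strs,size):
--     res = 0
--     for i in range(0,len(strs)):
--         cnt = 0
--         substr = ""
--         for j in range(i,i+size):
--             if j == len(strs):
--                 break
--             if strs[j] == "a":
--                 cnt += 1
--             substr += strs[j]
--
--         if len(substr) == size:
--             res = max(cnt,res)
--
--     return res
-- ===== SOURCE B (Python) =====
-- def solve(strs, size):
--     n = len(strs)
--     if size < 0 or size > n:
--         return 0
--     cnt = sum(1 for c in strs[:size] if c == 'a')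
--     res = cnt
--     for i in range(size, n):
--         cnt += (strs[i] == 'a') - (strs[i - size] == 'a')
--         if cnt > res:
--             res = cnt
--     return res
-- ===== Notes on version B (the rewrite author's own statement) =====
-- stated objective: faster
-- what changed: Replaces the nested loop that rebuilds and rescans every length-k substring with a single sliding-window pass that updates the 'a' count incrementally.
import Mathlib
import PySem

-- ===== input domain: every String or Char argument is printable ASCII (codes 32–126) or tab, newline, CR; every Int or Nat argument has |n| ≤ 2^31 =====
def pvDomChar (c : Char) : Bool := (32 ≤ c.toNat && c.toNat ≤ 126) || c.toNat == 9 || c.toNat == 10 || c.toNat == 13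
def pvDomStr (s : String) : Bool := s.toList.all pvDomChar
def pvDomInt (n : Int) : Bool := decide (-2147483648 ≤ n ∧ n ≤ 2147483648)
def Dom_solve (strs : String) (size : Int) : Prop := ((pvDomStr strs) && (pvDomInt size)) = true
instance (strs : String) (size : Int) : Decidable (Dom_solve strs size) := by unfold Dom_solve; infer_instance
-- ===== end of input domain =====

-- B replaces A's O(n*size) rebuild-and-rescan of every window with one O(n) sliding-window pass (return value only; neither mutates).

-- ===== PORT A =====
def solveInner (l : List Char) (stop : Int) (j : Int) (cnt : Int) (substr : List Char) : Int × List Char :=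
  if j < stop then
    if j = (l.length : Int) then (cnt, substr)
    else
      let c := PySem.List.pyGetD l j ' '
      solveInner l stop (j + 1) (if c = 'a' then cnt + 1 else cnt) (substr ++ [c])
  else (cnt, substr)
termination_by (stop - j).toNat
decreasing_by omega

def solveOuter (l : List Char) (size : Int) (i : Int) (res : Int) : Int :=
  if i < (l.length : Int) then
    let p := solveInner l (i + size) i 0 []
    solveOuter l size (i + 1) (if (p.2.length : Int) = size then max p.1 res else res)
  else res
termination_by ((l.length : Int) - i).toNat
decreasing_by omega

def solve (strs : String) (size : Int) : Int := solveOuter strs.toList size 0 0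

-- ===== PORT B =====
def countA (w : List Char) : Int := w.foldl (fun acc c => if c = 'a' then acc + 1 else acc) 0

def solveLoop (l : List Char) (size : Int) (i : Int) (cnt : Int) (res : Int) : Int :=
  if i < (l.length : Int) then
    let cnt' := cnt + (if PySem.List.pyGetD l i ' ' = 'a' then 1 else 0)
                    - (if PySem.List.pyGetD l (i - size) ' ' = 'a' then 1 else 0)
    solveLoop l size (i + 1) cnt' (if cnt' > res then cnt' else res)
  else res
termination_by ((l.length : Int) - i).toNat
decreasing_by omega

def solve_alt (strs : String) (size : Int) : Int :=
  let l := strs.toList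
  if size < 0 ∨ (l.length : Int) < size then 0
  else
    let cnt := countA (PySem.List.slice l none (some size))
    solveLoop l size size cnt cnt

-- ===== PRECONDITION & SPEC =====
def Spec_solve (strs : String) (size : Int) (out : Int) : Prop := out = solve_alt strs size
instance (strs : String) (size : Int) (out : Int) : Decidable (Spec_solve strs size out) := by unfold Spec_solve; infer_instance

-- ===== CLAIM (what is proved, stated in full; the proofs are below) =====
def Claim_equal_solve : Prop := ∀ (strs : String) (size : Int), Dom_solve strs size → Spec_solve strs size (solve strs size)

-- ===== LEMMAS AND PROOFS =====

def cntw (l : List Char) (k s : Nat) : Nat := ((l.drop s).take k).count 'a'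
def stepMax (l : List Char) (k : Nat) (r : Int) (s : Nat) : Int := max ((cntw l k s : Int)) r
lemma inner_spec (l : List Char) (d : Nat) : ∀ (p : Nat) (cnt : Int) (substr : List Char), p ≤ l.length →
    solveInner l ((p : Int) + (d : Int)) (p : Int) cnt substr
      = (cnt + (((l.drop p).take d).count 'a' : Int), substr ++ (l.drop p).take d) := by
  induction d with
  | zero =>
    intro p cnt substr hp
    rw [solveInner]
    simp
  | succ d ih =>
    intro p cnt substr hp
    rw [solveInner]
    simp only [Nat.cast_add, Nat.cast_one]
    rw [if_pos (by omega : (p:Int) < (p:Int) + ((d:Int)+1))]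
    rcases eq_or_lt_of_le hp with he | hlt
    · rw [if_pos (by exact_mod_cast he)]
      simp [he]
    · have hne : (p : Int) ≠ (l.length : Int) := by exact_mod_cast Nat.ne_of_lt hlt
      rw [if_neg hne]
      have hget : PySem.List.pyGetD l (p : Int) ' ' = l[p]'hlt := by
        rw [PySem.List.pyGetD_natCast]; exact List.getD_eq_getElem l ' ' hlt
      have hcast : (p : Int) + ((d:Int) + 1) = ((p+1 : Nat) : Int) + (d : Int) := by push_cast; ring
      have hcast2 : (p : Int) + 1 = ((p+1 : Nat) : Int) := by push_cast; ring
      rw [hget, hcast, hcast2, ih (p+1) _ _ (by omega)]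
      have hdrop : l.drop p = l[p]'hlt :: l.drop (p + 1) := List.drop_eq_getElem_cons hlt
      have htake : (l.drop p).take (d+1) = l[p]'hlt :: (l.drop (p+1)).take d := by
        rw [hdrop, List.take_succ_cons]
      rw [htake]
      by_cases hc : l[p]'hlt = 'a' <;>
        simp [hc, List.count_cons, List.append_assoc] <;> (try push_cast) <;> (try omega)


lemma outerA_spec (l : List Char) (k : Nat) (hk : 1 ≤ k) (d : Nat) :
    ∀ (m : Nat) (res : Int), m ≤ l.length → d = l.length - m →
    solveOuter l (k : Int) (m : Int) res
      = (List.range' m (l.length + 1 - k - m)).foldl (stepMax l k) res := by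
  induction d with
  | zero =>
    intro m res hm hd
    have hmn : m = l.length := by omega
    rw [solveOuter, if_neg (by exact_mod_cast (by omega : ¬ m < l.length))]
    rw [show l.length + 1 - k - m = 0 by omega, List.range'_zero, List.foldl_nil]
  | succ d ih =>
    intro m res hm hd
    have hmn : m < l.length := by omega
    rw [solveOuter, if_pos (by exact_mod_cast hmn)]
    have hin := inner_spec l k m 0 [] (by omega)
    simp only [hin, List.nil_append, zero_add, List.length_take, List.length_drop]
    have hcast2 : (m : Int) + 1 = ((m+1 : Nat) : Int) := by push_cast; ring
    rw [hcast2, ih (m+1) _ (by omega) (by omega)]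
    by_cases hc : k ≤ l.length - m
    · rw [if_pos (by exact_mod_cast (by omega : min k (l.length - m) = k))]
      rw [show l.length + 1 - k - m = (l.length + 1 - k - (m+1)) + 1 by omega, List.range'_succ,
          List.foldl_cons]
      congr 1
    · rw [if_neg (by
        intro h
        have : min k (l.length - m) = k := by exact_mod_cast h
        omega)]
      simp [show l.length + 1 - k - m = 0 by omega, show l.length + 1 - k - (m+1) = 0 by omega]

lemma outer_zero (l : List Char) (d : Nat) : ∀ (m : Nat), m ≤ l.length → d = l.length - m →
    solveOuter l 0 (m : Int) 0 = 0 := by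
  induction d with
  | zero =>
    intro m hm hd
    rw [solveOuter, if_neg (by exact_mod_cast (by omega : ¬ m < l.length))]
  | succ d ih =>
    intro m hm hd
    have hmn : m < l.length := by omega
    rw [solveOuter, if_pos (by exact_mod_cast hmn)]
    have hin : solveInner l ((m : Int) + 0) (m : Int) 0 [] = (0 + ((([] : List Char).count 'a' : Nat) : Int), [] ++ ([] : List Char)) := by
      have := inner_spec l 0 m 0 [] (by omega)
      simpa using this
    simp only [hin]
    have hcast2 : (m : Int) + 1 = ((m+1 : Nat) : Int) := by push_cast; ring
    simp only [List.count_nil, Nat.cast_zero, zero_add, List.append_nil, List.length_nil,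
               Nat.cast_ofNat, if_pos]
    rw [hcast2]
    simpa using ih (m+1) (by omega) (by omega)

lemma outer_neg (l : List Char) (size : Int) (hs : size < 0) (d : Nat) :
    ∀ (m : Nat) (res : Int), m ≤ l.length → d = l.length - m →
    solveOuter l size (m : Int) res = res := by
  induction d with
  | zero =>
    intro m res hm hd
    rw [solveOuter, if_neg (by exact_mod_cast (by omega : ¬ m < l.length))]
  | succ d ih =>
    intro m res hm hd
    have hmn : m < l.length := by omega
    rw [solveOuter, if_pos (by exact_mod_cast hmn)]
    have hinner : solveInner l ((m : Int) + size) (m : Int) 0 [] = (0, []) := by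
      rw [solveInner, if_neg (by omega)]
    simp only [hinner, List.length_nil, Nat.cast_zero]
    rw [if_neg (by omega)]
    have hcast2 : (m : Int) + 1 = ((m+1 : Nat) : Int) := by push_cast; ring
    rw [hcast2, ih (m+1) res (by omega) (by omega)]

lemma cntw_slide (l : List Char) (k s : Nat) (hk : 1 ≤ k) (h : s + k < l.length) :
    (cntw l k (s + 1) : Int)
      = (cntw l k s : Int) + (if l.getD (s + k) ' ' = 'a' then 1 else 0)
          - (if l.getD s ' ' = 'a' then 1 else 0) := by
  obtain ⟨k', rfl⟩ : ∃ k', k = k' + 1 := ⟨k - 1, by omega⟩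
  have hs : s < l.length := by omega
  have hsk : s + (k' + 1) < l.length := h
  have hgd1 : l.getD (s + (k' + 1)) ' ' = l[s + (k' + 1)]'hsk := List.getD_eq_getElem l ' ' hsk
  have hgd2 : l.getD s ' ' = l[s]'hs := List.getD_eq_getElem l ' ' hs
  have hwin_s : (l.drop s).take (k' + 1) = l[s]'hs :: (l.drop (s+1)).take k' := by
    rw [List.drop_eq_getElem_cons hs, List.take_succ_cons]
  have hidx : (l.drop (s+1))[k']? = some (l[s + (k' + 1)]'hsk) := by
    rw [List.getElem?_drop, show s + 1 + k' = s + (k' + 1) by omega]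
    exact List.getElem?_eq_getElem hsk
  have hwin_s1 : (l.drop (s+1)).take (k' + 1) = (l.drop (s+1)).take k' ++ [l[s + (k' + 1)]'hsk] := by
    rw [List.take_succ, hidx]
    simp
  unfold cntw
  rw [hwin_s, hwin_s1, hgd1, hgd2, List.count_append, List.count_cons]
  by_cases h1 : l[s + (k' + 1)]'hsk = 'a' <;> by_cases h2 : l[s]'hs = 'a' <;>
    simp [h1, h2] <;> push_cast <;> ring

lemma loopB_spec (l : List Char) (k : Nat) (hk : 1 ≤ k) (d : Nat) :
    ∀ (m : Nat) (res : Int), k ≤ m → m ≤ l.length → d = l.length - m →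
    solveLoop l (k : Int) (m : Int) ((cntw l k (m - k) : Int)) res
      = (List.range' (m - k + 1) (l.length - m)).foldl (stepMax l k) res := by
  induction d with
  | zero =>
    intro m res hkm hm hd
    rw [solveLoop, if_neg (by exact_mod_cast (by omega : ¬ m < l.length))]
    rw [show l.length - m = 0 by omega, List.range'_zero, List.foldl_nil]
  | succ d ih =>
    intro m res hkm hm hd
    have hmn : m < l.length := by omega
    rw [solveLoop, if_pos (by exact_mod_cast hmn)]
    have e1 : PySem.List.pyGetD l (m : Int) ' ' = l.getD m ' ' := PySem.List.pyGetD_natCast l m ' '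
    have e2 : (m : Int) - (k : Int) = ((m - k : Nat) : Int) := by omega
    have e3 : PySem.List.pyGetD l ((m - k : Nat) : Int) ' ' = l.getD (m - k) ' ' :=
      PySem.List.pyGetD_natCast l (m - k) ' '
    have hslide := cntw_slide l k (m - k) hk (by omega : (m - k) + k < l.length)
    rw [show (m - k) + k = m by omega] at hslide
    have hcnt' : (cntw l k (m - k) : Int) + (if PySem.List.pyGetD l (m : Int) ' ' = 'a' then 1 else 0)
        - (if PySem.List.pyGetD l ((m : Int) - (k : Int)) ' ' = 'a' then 1 else 0)
        = (cntw l k (m - k + 1) : Int) := by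
      rw [e1, e2, e3, hslide]
    rw [hcnt']
    dsimp only
    have hres' : (if (cntw l k (m - k + 1) : Int) > res then (cntw l k (m - k + 1) : Int) else res)
        = stepMax l k res (m - k + 1) := by
      simp only [stepMax]; omega
    rw [hres']
    have hcast2 : (m : Int) + 1 = ((m + 1 : Nat) : Int) := by push_cast; ring
    have hc3 : (cntw l k (m - k + 1) : Int) = (cntw l k ((m + 1) - k) : Int) := by
      rw [show (m + 1) - k = m - k + 1 by omega]
    rw [hcast2, hc3, ih (m + 1) _ (by omega) (by omega) (by omega)]
    rw [show l.length - m = (l.length - (m + 1)) + 1 by omega, List.range'_succ, List.foldl_cons]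
    rw [show (m + 1) - k + 1 = m - k + 1 + 1 by omega]

lemma loopB_zero (l : List Char) (d : Nat) : ∀ (m : Nat), m ≤ l.length → d = l.length - m →
    solveLoop l 0 (m : Int) 0 0 = 0 := by
  induction d with
  | zero =>
    intro m hm hd
    rw [solveLoop, if_neg (by exact_mod_cast (by omega : ¬ m < l.length))]
  | succ d ih =>
    intro m hm hd
    rw [solveLoop, if_pos (by exact_mod_cast (by omega : m < l.length))]
    have e : (m : Int) - 0 = (m : Int) := by ring
    rw [e]
    have hcnt : (0 : Int) + (if PySem.List.pyGetD l (m : Int) ' ' = 'a' then 1 else 0)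
        - (if PySem.List.pyGetD l (m : Int) ' ' = 'a' then 1 else 0) = 0 := by ring
    rw [hcnt]
    dsimp only
    have hres : (if (0 : Int) > 0 then (0 : Int) else 0) = 0 := by norm_num
    rw [hres]
    have hcast2 : (m : Int) + 1 = ((m + 1 : Nat) : Int) := by push_cast; ring
    rw [hcast2, ih (m + 1) (by omega) (by omega)]

lemma countA_count (w : List Char) : countA w = (w.count 'a' : Int) := by
  unfold countA
  rw [PySem.List.foldl_ite_add_one]
  simp only [zero_add, Nat.cast_inj, List.count_eq_countP]
  exact List.countP_congr (by intro x _; simp)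

lemma main_eq (strs : String) (size : Int) : solve strs size = solve_alt strs size := by
  unfold solve solve_alt
  dsimp only
  by_cases hneg : size < 0
  · rw [if_pos (Or.inl hneg)]
    have h := outer_neg strs.toList size hneg (strs.toList.length) 0 0 (by omega) (by omega)
    simpa using h
  · push_neg at hneg
    obtain ⟨k, rfl⟩ : ∃ k : Nat, size = (k : Int) := ⟨size.toNat, (Int.toNat_of_nonneg hneg).symm⟩
    by_cases hk0 : k = 0
    · subst hk0
      rw [if_neg (by rintro (h|h) <;> (push_cast at h; try omega))]
      have hsl : PySem.List.slice strs.toList none (some ((0 : Nat) : Int)) = strs.toList.take 0 :=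
        PySem.List.slice_to_natCast strs.toList 0
      rw [hsl]
      simp only [List.take_zero]
      have hA := outer_zero strs.toList (strs.toList.length) 0 (by omega) (by omega)
      have hB := loopB_zero strs.toList (strs.toList.length) 0 (by omega) (by omega)
      simp only [Nat.cast_zero] at hA hB
      simp only [Nat.cast_zero]
      rw [show countA [] = (0 : Int) from rfl, hA, hB]
    · have hk1 : 1 ≤ k := by omega
      by_cases hbig : strs.toList.length < k
      · rw [if_pos (Or.inr (by exact_mod_cast hbig))]
        have hA := outerA_spec strs.toList k hk1 (strs.toList.length) 0 0 (by omega) (by omega)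
        rw [show strs.toList.length + 1 - k - 0 = 0 by omega, List.range'_zero, List.foldl_nil] at hA
        simpa using hA
      · rw [if_neg (by rintro (h|h) <;> (push_cast at h; try omega))]
        have hsl : PySem.List.slice strs.toList none (some ((k : Nat) : Int)) = strs.toList.take k :=
          PySem.List.slice_to_natCast strs.toList k
        rw [hsl]
        have hcnt0 : countA (strs.toList.take k) = ((cntw strs.toList k 0 : Nat) : Int) := by
          rw [countA_count]; simp [cntw]
        rw [hcnt0]
        have hB := loopB_spec strs.toList k hk1 (strs.toList.length - k) k
          ((cntw strs.toList k 0 : Nat) : Int) le_rfl (by omega) (by omega)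
        rw [show k - k = 0 by omega] at hB
        have hA := outerA_spec strs.toList k hk1 (strs.toList.length) 0 0 (by omega) (by omega)
        rw [show strs.toList.length + 1 - k - 0 = (strs.toList.length - k) + 1 by omega,
            List.range'_succ, List.foldl_cons] at hA
        have hstep : stepMax strs.toList k 0 0 = ((cntw strs.toList k 0 : Nat) : Int) := by
          simp only [stepMax]; omega
        rw [hstep] at hA
        simp only [Nat.cast_zero] at hA
        rw [hA, hB]

-- ===== VERDICT (by name: the statement is the Claim_ definition above) =====
theorem solve_spec : Claim_equal_solve := by
  intro strs size _
  unfold Spec_solve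
  exact main_eq strs size
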